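-- pv_equiv track=rewrite | github.com/niamh-2303/final-year-project | app/controllers/generate_report.py | _diff_hashes
-- ===== SOURCE A (Python) =====
-- def _diff_hashes(h1, h2):
--     """Return copies of both hashes; positions where they differ are upper-cased."""
--     if not h1 or not h2 or len(h1) != len(h2):
--         return h1 or "—", h2 or "—"
--     out1, out2 = [], []
--     for a, b in zip(h1, h2):
--         out1.append(a.upper() if a != b else a)
--         out2.append(b.upper() if a != b else b)
--     return "".join(out1), "".join(out2)
-- ===== SOURCE B (Python) =====
-- def _diff_hashes(h1, h2):
--     """Return copies of both hashes; positions where they differ are upper-cased."""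
--     if not h1 or not h2 or len(h1) != len(h2):
--         return h1 or "—", h2 or "—"
--     diffs = [i for i in range(len(h1)) if h1[i] != h2[i]]
--     c1, c2 = list(h1), list(h2)
--     for i in diffs:
--         c1[i] = c1[i].upper()
--         c2[i] = c2[i].upper()
--     return "".join(c1), "".join(c2)
-- ===== Notes on version B (the rewrite author's own statement) =====
-- stated objective: alternative
-- what changed: Instead of one zip loop appending per-position characters to two output lists, B first collects the list of differing indices, then mutates list copies of both strings only at those indices.
import Mathlib
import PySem

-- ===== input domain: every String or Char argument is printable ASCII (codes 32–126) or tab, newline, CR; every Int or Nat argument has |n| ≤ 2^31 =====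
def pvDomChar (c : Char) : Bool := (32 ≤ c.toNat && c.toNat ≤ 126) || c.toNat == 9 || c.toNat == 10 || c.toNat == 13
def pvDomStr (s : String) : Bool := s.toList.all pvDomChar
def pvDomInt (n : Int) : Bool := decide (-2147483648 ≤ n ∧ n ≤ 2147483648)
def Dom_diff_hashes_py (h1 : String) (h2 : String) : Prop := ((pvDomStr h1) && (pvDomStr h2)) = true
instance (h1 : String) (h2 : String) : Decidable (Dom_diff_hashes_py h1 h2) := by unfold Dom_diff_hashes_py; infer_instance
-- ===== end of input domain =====

-- B replaces A's single zip-append loop by two phases (collect differing indices, then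
-- in-place updates on list copies at exactly those indices); objective: alternative.

-- ===== PORT A =====
-- literal port of A: guard, then one loop over zip(h1,h2) appending to out1/out2
def diff_hashes_py (h1 : String) (h2 : String) : String × String :=
  let l1 := h1.toList
  let l2 := h2.toList
  if l1 = [] ∨ l2 = [] ∨ l1.length ≠ l2.length then
    ((if l1 = [] then "—" else h1), (if l2 = [] then "—" else h2))
  else
    let p := (l1.zip l2).foldl
      (fun (acc : List Char × List Char) (ab : Char × Char) =>
        (acc.1 ++ [if ab.1 ≠ ab.2 then PySem.Chars.upperChar ab.1 else ab.1],
         acc.2 ++ [if ab.1 ≠ ab.2 then PySem.Chars.upperChar ab.2 else ab.2]))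
      ([], [])
    (String.mk p.1, String.mk p.2)

-- ===== PORT B =====
-- c[i] = c[i].upper() ; index i is always in range when used (i ∈ range(len)), so getD is exact
def pvUpd (c : List Char) (i : Nat) : List Char :=
  c.set i (PySem.Chars.upperChar (c.getD i ' '))

-- literal port of B (Source B): guard, the list of differing indices, then the update loop
def diff_hashes_py_alt (h1 : String) (h2 : String) : String × String :=
  let l1 := h1.toList
  let l2 := h2.toList
  if l1 = [] ∨ l2 = [] ∨ l1.length ≠ l2.length then
    ((if l1 = [] then "—" else h1), (if l2 = [] then "—" else h2))
  else
    let diffs := (List.range l1.length).filter (fun i => l1.getD i ' ' ≠ l2.getD i ' ')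
    let p := diffs.foldl
      (fun (acc : List Char × List Char) i => (pvUpd acc.1 i, pvUpd acc.2 i)) (l1, l2)
    (String.mk p.1, String.mk p.2)

-- ===== PRECONDITION & SPEC =====
def Spec_diff_hashes_py (h1 : String) (h2 : String) (out : String × String) : Prop := out = diff_hashes_py_alt h1 h2
instance (h1 : String) (h2 : String) (out : String × String) : Decidable (Spec_diff_hashes_py h1 h2 out) := by unfold Spec_diff_hashes_py; infer_instance

-- ===== CLAIM (what is proved, stated in full; the proofs are below) =====
def Claim_equal_diff_hashes_py : Prop := ∀ (h1 : String) (h2 : String), Dom_diff_hashes_py h1 h2 → Spec_diff_hashes_py h1 h2 (diff_hashes_py h1 h2)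

-- ===== LEMMAS AND PROOFS =====

-- A's append loop builds acc ++ the pointwise map
theorem pvFoldA (l : List (Char × Char)) (a1 a2 : List Char) :
    l.foldl
      (fun (acc : List Char × List Char) (ab : Char × Char) =>
        (acc.1 ++ [if ab.1 ≠ ab.2 then PySem.Chars.upperChar ab.1 else ab.1],
         acc.2 ++ [if ab.1 ≠ ab.2 then PySem.Chars.upperChar ab.2 else ab.2]))
      (a1, a2)
    = (a1 ++ l.map (fun ab => if ab.1 ≠ ab.2 then PySem.Chars.upperChar ab.1 else ab.1),
       a2 ++ l.map (fun ab => if ab.1 ≠ ab.2 then PySem.Chars.upperChar ab.2 else ab.2)) := by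
  induction l generalizing a1 a2 with
  | nil => simp
  | cons hd tl ih => rw [List.foldl_cons, ih]; simp

-- B's pair fold splits into two independent component folds
theorem pvFoldB (ids : List Nat) (c1 c2 : List Char) :
    ids.foldl (fun (acc : List Char × List Char) i => (pvUpd acc.1 i, pvUpd acc.2 i)) (c1, c2)
    = (ids.foldl pvUpd c1, ids.foldl pvUpd c2) := by
  induction ids generalizing c1 c2 with
  | nil => rfl
  | cons hd tl ih => simp [List.foldl_cons, ih]

theorem pvUpdFold_length (ids : List Nat) (c : List Char) :
    (ids.foldl pvUpd c).length = c.length := by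
  induction ids generalizing c with
  | nil => rfl
  | cons hd tl ih => simp [List.foldl_cons, ih, pvUpd]

theorem pvUpdFold_getD (ids : List Nat) (c : List Char) (j : Nat) (hj : j < c.length)
    (hnd : ids.Nodup) :
    (ids.foldl pvUpd c).getD j ' '
    = if j ∈ ids then PySem.Chars.upperChar (c.getD j ' ') else c.getD j ' ' := by
  induction ids generalizing c with
  | nil => simp
  | cons hd tl ih =>
    have hnd' := hnd
    simp only [List.nodup_cons] at hnd'
    rw [List.foldl_cons]
    by_cases hin : hd < c.length
    · rw [ih (pvUpd c hd) (by simpa [pvUpd] using hj) hnd'.2]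
      by_cases hje : j = hd
      · subst hje
        simp [pvUpd, List.getElem?_set, hj, hnd'.1]
      · have hj' : j < (pvUpd c hd).length := by simpa [pvUpd] using hj
        simp [pvUpd, List.mem_cons, hje, List.getElem?_set, Ne.symm hje]
    · -- hd out of range: pvUpd is the identity (set past the end)
      have hid : pvUpd c hd = c := by
        unfold pvUpd; exact List.set_eq_of_length_le (by omega)
      rw [hid, ih c hj hnd'.2]
      have hjne : j ≠ hd := by omega
      simp [List.mem_cons, hjne]

theorem pvCore (l1 l2 : List Char) (hlen : l1.length = l2.length) :
    ((List.range l1.length).filter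
        (fun i => l1.getD i ' ' ≠ l2.getD i ' ')).foldl pvUpd l1
    = (l1.zip l2).map (fun ab => if ab.1 ≠ ab.2 then PySem.Chars.upperChar ab.1 else ab.1)
    ∧
    ((List.range l1.length).filter
        (fun i => l1.getD i ' ' ≠ l2.getD i ' ')).foldl pvUpd l2
    = (l1.zip l2).map (fun ab => if ab.1 ≠ ab.2 then PySem.Chars.upperChar ab.2 else ab.2) := by
  set ids := (List.range l1.length).filter (fun i => l1.getD i ' ' ≠ l2.getD i ' ') with hids
  have hnd : ids.Nodup := (List.nodup_range).filter _
  have hmem : ∀ j, j ∈ ids ↔ j < l1.length ∧ l1.getD j ' ' ≠ l2.getD j ' ' := by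
    intro j; simp [hids, List.mem_filter, List.mem_range]
  constructor
  · apply List.ext_getElem
    · simp [pvUpdFold_length, hlen]
    · intro j hja hjb
      have hj1 : j < l1.length := by
        have := pvUpdFold_length ids l1; omega
      have hj2 : j < l2.length := by omega
      have h := pvUpdFold_getD ids l1 j hj1 hnd
      rw [List.getD_eq_getElem _ _ hja] at h
      rw [h, List.getElem_map, List.getElem_zip]
      simp only [hmem j]
      simp [List.getElem?_eq_getElem, hj1, hj2]
  · apply List.ext_getElem
    · simp [pvUpdFold_length, hlen]
    · intro j hja hjb
      have hj2 : j < l2.length := by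
        have := pvUpdFold_length ids l2; omega
      have hj1 : j < l1.length := by omega
      have h := pvUpdFold_getD ids l2 j hj2 hnd
      rw [List.getD_eq_getElem _ _ hja] at h
      rw [h, List.getElem_map, List.getElem_zip]
      simp only [hmem j]
      simp [List.getElem?_eq_getElem, hj1, hj2]

-- ===== VERDICT (by name: the statement is the Claim_ definition above) =====
theorem diff_hashes_py_spec : Claim_equal_diff_hashes_py := by
  intro h1 h2 _
  show _ = _
  simp only [diff_hashes_py, diff_hashes_py_alt]
  by_cases hg : h1.toList = [] ∨ h2.toList = [] ∨ h1.toList.length ≠ h2.toList.length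
  · rw [if_pos hg, if_pos hg]
  · rw [if_neg hg, if_neg hg]
    rw [not_or, not_or] at hg
    obtain ⟨-, -, hlen⟩ := hg
    rw [not_ne_iff] at hlen
    rw [pvFoldA, pvFoldB, (pvCore _ _ hlen).1, (pvCore _ _ hlen).2,
      List.nil_append, List.nil_append]
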